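-- pv_equiv track=rewrite | github.com/chena/aoc-2017 | day2.py | corruption_checksum
-- ===== SOURCE A (Python) =====
-- def corruption_checksum(rows):
--   diffs = []
--   for r in rows:
--     min_val = r[0]
--     max_val = r[0]
--     for n in range(1, len(r)):
--       if (r[n] < min_val):
--         min_val = r[n]
--       elif (r[n] > max_val):
--         max_val = r[n]
--     diffs.append(max_val - min_val)
--   return sum(diffs)
-- ===== SOURCE B (Python) =====
-- def corruption_checksum(rows):
--   total = 0
--   for r in rows:
--     s = sorted(r)
--     total += s[-1] - s[0]
--   return total
-- ===== Notes on version B (the rewrite author's own statement) =====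
-- stated objective: alternative
-- what changed: B sorts each row and takes last-minus-first as the spread, summing directly into an accumulator, instead of A's fused running min/max scan collected into a diffs list.
import Mathlib
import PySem

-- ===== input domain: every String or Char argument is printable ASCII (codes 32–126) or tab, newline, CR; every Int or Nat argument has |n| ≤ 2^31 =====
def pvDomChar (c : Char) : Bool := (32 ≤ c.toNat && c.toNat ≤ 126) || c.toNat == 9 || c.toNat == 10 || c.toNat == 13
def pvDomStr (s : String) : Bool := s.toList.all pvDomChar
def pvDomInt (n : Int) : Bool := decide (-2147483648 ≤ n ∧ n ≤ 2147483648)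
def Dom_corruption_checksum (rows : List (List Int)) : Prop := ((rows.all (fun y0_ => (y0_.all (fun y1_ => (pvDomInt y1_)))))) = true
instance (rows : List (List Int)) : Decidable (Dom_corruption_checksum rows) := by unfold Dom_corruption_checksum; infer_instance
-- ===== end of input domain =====

-- ===== PORT A =====
-- B re-implements the per-row spread by sorting (endpoints of the sorted row) instead of A's running min/max scan.
-- inner loop of A over r[1:], updating (min_val, max_val)
def pvScanA (p : Int × Int) (n : Int) : Int × Int :=
  if n < p.1 then (n, p.2) else if n > p.2 then (p.1, n) else p

def pvRowA (r : List Int) : Int :=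
  match r with
  | [] => 0  -- Python raises IndexError here; excluded by Pre_
  | x :: t =>
    let p := t.foldl pvScanA (x, x)
    p.2 - p.1

def corruption_checksum (rows : List (List Int)) : Int :=
  (rows.foldl (fun ds r => ds ++ [pvRowA r]) ([] : List Int)).foldl (· + ·) 0

-- ===== PORT B =====
def pvRowB (r : List Int) : Int :=
  let s := PySem.List.sorted r (fun x => x) false
  match PySem.List.pyGet? s (-1), PySem.List.pyGet? s 0 with
  | some a, some b => a - b
  | _, _ => 0  -- Python raises IndexError here; excluded by Pre_

def corruption_checksum_alt (rows : List (List Int)) : Int :=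
  rows.foldl (fun total r => total + pvRowB r) 0

-- ===== PRECONDITION & SPEC =====
-- Pre_ excludes inputs containing an empty row, on which A raises IndexError (r[0]).
def Pre_corruption_checksum (rows : List (List Int)) : Prop :=
  ∀ r ∈ rows, r ≠ []
instance (rows : List (List Int)) : Decidable (Pre_corruption_checksum rows) := by unfold Pre_corruption_checksum; infer_instance
def pvWitness_corruption_checksum : List (List Int) := [[5, 1, 9, 5], [7, 5, 3], [2, 4, 6, 8]]
def Spec_corruption_checksum (rows : List (List Int)) (out : Int) : Prop := out = corruption_checksum_alt rows
instance (rows : List (List Int)) (out : Int) : Decidable (Spec_corruption_checksum rows out) := by unfold Spec_corruption_checksum; infer_instance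

-- ===== CLAIM (what is proved, stated in full; the proofs are below) =====
def Claim_equal_corruption_checksum : Prop := ∀ (rows : List (List Int)), Dom_corruption_checksum rows → Pre_corruption_checksum rows → Spec_corruption_checksum rows (corruption_checksum rows)

-- ===== LEMMAS AND PROOFS =====

-- A's scan computes the running min and max
theorem pvScanA_foldl (t : List Int) : ∀ (mn mx : Int), mn ≤ mx →
    t.foldl pvScanA (mn, mx) = (t.foldl min mn, t.foldl max mx) := by
  induction t with
  | nil => intro mn mx _; rfl
  | cons y t ih =>
    intro mn mx h
    simp only [List.foldl_cons, pvScanA]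
    split_ifs with h1 h2
    · rw [ih y mx (by omega)]
      congr 1 <;> [skip; skip] <;> congr 1 <;> omega
    · rw [ih mn y (by omega)]
      congr 1 <;> congr 1 <;> omega
    · rw [ih mn mx h]
      congr 1 <;> congr 1 <;> omega

theorem foldl_min_mem (t : List Int) : ∀ x : Int, t.foldl min x ∈ x :: t := by
  induction t with
  | nil => intro x; simp
  | cons y t ih =>
    intro x
    simp only [List.foldl_cons]
    rcases List.mem_cons.mp (ih (min x y)) with h | h
    · rw [List.mem_cons, List.mem_cons, h]
      rcases le_total x y with hxy | hxy
      · exact Or.inl (min_eq_left hxy)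
      · exact Or.inr (Or.inl (min_eq_right hxy))
    · exact .tail _ (.tail _ h)

theorem foldl_max_mem (t : List Int) : ∀ x : Int, t.foldl max x ∈ x :: t := by
  induction t with
  | nil => intro x; simp
  | cons y t ih =>
    intro x
    simp only [List.foldl_cons]
    rcases List.mem_cons.mp (ih (max x y)) with h | h
    · rw [List.mem_cons, List.mem_cons, h]
      rcases le_total x y with hxy | hxy
      · exact Or.inr (Or.inl (max_eq_right hxy))
      · exact Or.inl (max_eq_left hxy)
    · exact .tail _ (.tail _ h)

theorem foldl_min_le (t : List Int) : ∀ x : Int, ∀ y ∈ x :: t, t.foldl min x ≤ y := by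
  induction t with
  | nil => intro x y hy; simp only [List.foldl_nil]; simp at hy; omega
  | cons z t ih =>
    intro x y hy
    simp only [List.foldl_cons]
    rcases List.mem_cons.mp hy with rfl | hy'
    · exact le_trans (ih _ _ (.head _)) (min_le_left _ _)
    · rcases List.mem_cons.mp hy' with rfl | hy''
      · exact le_trans (ih _ _ (.head _)) (min_le_right _ _)
      · exact ih _ y (.tail _ hy'')

theorem le_foldl_max (t : List Int) : ∀ x : Int, ∀ y ∈ x :: t, y ≤ t.foldl max x := by
  induction t with
  | nil => intro x y hy; simp only [List.foldl_nil]; simp at hy; omega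
  | cons z t ih =>
    intro x y hy
    simp only [List.foldl_cons]
    rcases List.mem_cons.mp hy with rfl | hy'
    · exact le_trans (le_max_left _ _) (ih _ _ (.head _))
    · rcases List.mem_cons.mp hy' with rfl | hy''
      · exact le_trans (le_max_right _ _) (ih _ _ (.head _))
      · exact ih _ y (.tail _ hy'')

-- last element of a ≤-pairwise list dominates all elements
theorem pairwise_le_getLast (l : List Int) (hp : l.Pairwise (· ≤ ·)) (h : l ≠ []) :
    ∀ y ∈ l, y ≤ l.getLast h := by
  induction l with
  | nil => exact absurd rfl h
  | cons a l ih =>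
    intro y hy
    cases l with
    | nil => simp at hy; simp [hy, List.getLast]
    | cons b l' =>
      rw [List.getLast_cons (by simp)]
      rcases List.mem_cons.mp hy with rfl | hy'
      · exact List.rel_of_pairwise_cons hp (List.getLast_mem _)
      · exact ih (List.pairwise_cons.mp hp).2 (by simp) y hy'

theorem pvRow_eq (r : List Int) (hr : r ≠ []) : pvRowA r = pvRowB r := by
  match r, hr with
  | x :: t, _ =>
    have hsne : PySem.List.sorted (x :: t) (fun x => x) false ≠ [] := by
      rw [Ne, PySem.List.sorted_eq_nil_iff]; simp
    obtain ⟨m, s, hs⟩ := List.exists_cons_of_ne_nil hsne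
    have hperm : (PySem.List.sorted (x :: t) (fun x => x) false).Perm (x :: t) :=
      PySem.List.sorted_perm _ _ _
    have hpair : (PySem.List.sorted (x :: t) (fun x => x) false).Pairwise (fun a b => a ≤ b) :=
      PySem.List.sorted_pairwise _ _
    -- head of sorted = foldl min
    have hmem_iff : ∀ y, y ∈ PySem.List.sorted (x :: t) (fun x => x) false ↔ y ∈ x :: t :=
      fun y => PySem.List.mem_sorted _ _ _ _
    have hmlo : ∀ y ∈ (x :: t), m ≤ y := by
      intro y hy
      exact PySem.List.key_head_sorted_le (xs := x :: t) (key := fun x => x) hs y hy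
    have hmmem : m ∈ x :: t := (hmem_iff m).mp (hs ▸ .head _)
    have hmin : t.foldl min x = m :=
      le_antisymm (foldl_min_le t x m hmmem) (hmlo _ (foldl_min_mem t x))
    -- last of sorted = foldl max
    set L := (PySem.List.sorted (x :: t) (fun x => x) false).getLast hsne with hL
    have hLhi : ∀ y ∈ (x :: t), y ≤ L := by
      intro y hy
      exact pairwise_le_getLast _ hpair hsne y ((hmem_iff y).mpr hy)
    have hLmem : L ∈ x :: t := (hmem_iff L).mp (List.getLast_mem hsne)
    have hmax : t.foldl max x = L :=
      le_antisymm (hLhi _ (foldl_max_mem t x)) (le_foldl_max t x L hLmem)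
    -- assemble
    have hlast? : PySem.List.pyGet? (PySem.List.sorted (x :: t) (fun x => x) false) (-1) = some L := by
      rw [PySem.List.pyGet?_neg_one, List.getLast?_eq_some_getLast hsne]
    have hhead? : PySem.List.pyGet? (PySem.List.sorted (x :: t) (fun x => x) false) 0 = some m := by
      rw [hs]; exact PySem.List.pyGet?_zero_cons _ _
    simp only [pvRowA, pvRowB, hlast?, hhead?]
    rw [pvScanA_foldl t x x le_rfl]
    simp [hmin, hmax]

theorem folds_eq (rows : List (List Int)) (h : ∀ r ∈ rows, r ≠ []) :
    ∀ ds : List Int,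
      ((rows.foldl (fun ds r => ds ++ [pvRowA r]) ds).foldl (· + ·) 0)
        = ds.foldl (· + ·) 0 + rows.foldl (fun total r => total + pvRowB r) 0 := by
  induction rows with
  | nil => intro ds; simp
  | cons r rows ih =>
    intro ds
    simp only [List.foldl_cons]
    rw [ih (fun a ha => h a (.tail _ ha)) (ds ++ [pvRowA r])]
    have hrow : pvRowA r = pvRowB r := pvRow_eq r (h r (.head _))
    have : (ds ++ [pvRowA r]).foldl (· + ·) 0 = ds.foldl (· + ·) 0 + pvRowB r := by
      rw [List.foldl_append, hrow]; simp
    rw [this]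
    have : ∀ (a b : Int) (l : List (List Int)),
        l.foldl (fun total r => total + pvRowB r) (a + b) =
        a + l.foldl (fun total r => total + pvRowB r) b := by
      intro a b l
      induction l generalizing b with
      | nil => simp
      | cons z l ihl => simp only [List.foldl_cons]; rw [add_assoc, ihl]
    rw [show (0:Int) + pvRowB r = pvRowB r + 0 by ring, this (pvRowB r) 0 rows]
    ring

-- ===== VERDICT (by name: the statement is the Claim_ definition above) =====
theorem corruption_checksum_spec : Claim_equal_corruption_checksum := by
  intro rows _ hpre
  show corruption_checksum rows = corruption_checksum_alt rows
  unfold corruption_checksum corruption_checksum_alt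
  rw [folds_eq rows hpre []]
  simp
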